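-- pv_equiv track=rewrite | github.com/tiankaixie/fairrankvis | server/core.py | clustering
-- ===== SOURCE A (Python) =====
-- def clustering(mins_bucket, res_array, nodes):
--     clusters = {}
--     for index, res in enumerate(res_array):
--         for i in range(len(mins_bucket)):
--             if res < mins_bucket[i]:
--                 clusters[nodes[index]] = i
--                 break
--             elif i == len(mins_bucket) - 1:
--                 clusters[nodes[index]] = i + 1
--                 break
--     return clusters
-- ===== SOURCE B (Python) =====
-- def _bisect_right(a, x):
--     lo, hi = 0, len(a)
--     while lo < hi:
--         mid = (lo + hi) // 2
--         if x < a[mid]: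
--             hi = mid
--         else:
--             lo = mid + 1
--     return lo
--
--
-- def clustering(mins_bucket, res_array, nodes):
--     # running prefix maximum of the thresholds: nondecreasing, and
--     # "first threshold exceeding res" = "first prefix-max exceeding res",
--     # so a binary search per value works without assuming mins_bucket sorted
--     prefix_max = []
--     best = None
--     for t in mins_bucket:
--         if best is None or t > best:
--             best = t
--         prefix_max.append(best)
--     clusters = {}
--     if prefix_max:
--         for index, res in enumerate(res_array):
--             clusters[nodes[index]] = _bisect_right(prefix_max, res)
--     return clusters
-- ===== Notes on version B (the rewrite author's own statement) =====
-- stated objective: faster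
-- what changed: Replaces the per-value linear scan of mins_bucket by a one-time running prefix-maximum of the thresholds (nondecreasing, so the first threshold exceeding a value equals the first prefix-max exceeding it) followed by a hand-written bisect_right binary search per value.
import Mathlib
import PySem

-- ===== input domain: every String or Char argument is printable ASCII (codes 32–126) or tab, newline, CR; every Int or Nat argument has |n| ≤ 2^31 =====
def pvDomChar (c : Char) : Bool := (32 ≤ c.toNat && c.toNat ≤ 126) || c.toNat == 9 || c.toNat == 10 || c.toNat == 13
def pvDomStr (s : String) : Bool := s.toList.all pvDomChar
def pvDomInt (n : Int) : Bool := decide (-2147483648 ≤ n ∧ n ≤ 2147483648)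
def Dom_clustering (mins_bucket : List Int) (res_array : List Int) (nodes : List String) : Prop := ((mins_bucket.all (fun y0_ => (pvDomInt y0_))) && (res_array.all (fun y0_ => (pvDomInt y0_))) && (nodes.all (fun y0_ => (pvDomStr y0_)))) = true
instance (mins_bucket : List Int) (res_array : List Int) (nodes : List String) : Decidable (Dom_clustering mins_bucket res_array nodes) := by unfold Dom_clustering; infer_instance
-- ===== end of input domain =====

-- B replaces A's per-value linear scan of mins_bucket by a one-time running prefix-maximum
-- plus a bisect_right binary search per value (objective: faster, asymptotic).

-- ===== PORT A =====
-- inner 'for i in range(len(mins_bucket))' loop with its two breaks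
def clusteringInner (mins : List Int) (res : Int) (node : String) (i : Nat) (d : PySem.Dict String Int) : PySem.Dict String Int :=
  if h : i < mins.length then
    if res < mins[i] then d.insert node (i : Int)
    else if i = mins.length - 1 then d.insert node ((i : Int) + 1)
    else clusteringInner mins res node (i + 1) d
  else d
termination_by mins.length - i

def clustering (mins_bucket : List Int) (res_array : List Int) (nodes : List String) : List (String × Int) :=
  ((PySem.List.enumerate res_array).foldl
    (fun clusters p =>
      clusteringInner mins_bucket p.2 ((PySem.List.pyGet? nodes p.1).getD "") 0 clusters)
    PySem.Dict.empty).items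

-- ===== PORT B =====
-- the running prefix-maximum loop of Source B (state: list built so far, current best)
def prefixMaxB (mins : List Int) : List Int × Option Int :=
  mins.foldl
    (fun s t =>
      let best := match s.2 with
        | none => t
        | some b => if t > b then t else b
      (s.1 ++ [best], some best))
    ([], none)

def clustering_alt (mins_bucket : List Int) (res_array : List Int) (nodes : List String) : List (String × Int) :=
  let pm := (prefixMaxB mins_bucket).1
  (if pm.isEmpty then PySem.Dict.empty else
    (PySem.List.enumerate res_array).foldl
      (fun clusters p =>
        clusters.insert ((PySem.List.pyGet? nodes p.1).getD "")
          ((PySem.List.bisectRight pm p.2 : Nat) : Int))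
      PySem.Dict.empty).items

-- ===== PRECONDITION & SPEC =====
-- Pre_ excludes exactly the inputs where Python A raises IndexError: mins_bucket nonempty
-- and res_array longer than nodes (nodes[index] out of range); B raises there too.
def Pre_clustering (mins_bucket : List Int) (res_array : List Int) (nodes : List String) : Prop :=
  mins_bucket = [] ∨ res_array.length ≤ nodes.length
instance (mins_bucket : List Int) (res_array : List Int) (nodes : List String) : Decidable (Pre_clustering mins_bucket res_array nodes) := by unfold Pre_clustering; infer_instance

def pvWitness_clustering : List Int × List Int × List String := ([1, 5], [0, 3, 7], ["a", "b", "c"])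

def Spec_clustering (mins_bucket : List Int) (res_array : List Int) (nodes : List String) (out : List (String × Int)) : Prop := out = clustering_alt mins_bucket res_array nodes
instance (mins_bucket : List Int) (res_array : List Int) (nodes : List String) (out : List (String × Int)) : Decidable (Spec_clustering mins_bucket res_array nodes out) := by unfold Spec_clustering; infer_instance

-- ===== CLAIM (what is proved, stated in full; the proofs are below) =====
def Claim_equal_clustering : Prop := ∀ (mins_bucket : List Int) (res_array : List Int) (nodes : List String), Dom_clustering mins_bucket res_array nodes → Pre_clustering mins_bucket res_array nodes → Spec_clustering mins_bucket res_array nodes (clustering mins_bucket res_array nodes)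

-- ===== LEMMAS AND PROOFS =====

-- recursive restatement of prefixMaxB's fold, for proofs
def pmRec (best : Option Int) : List Int → List Int
  | [] => []
  | t :: ts =>
      let b := match best with
        | none => t
        | some b0 => if t > b0 then t else b0
      b :: pmRec (some b) ts

theorem prefixMaxB_fst (mins : List Int) : (prefixMaxB mins).1 = pmRec none mins := by
  have h : ∀ (l : List Int) (acc : List Int) (best : Option Int),
      (l.foldl (fun s t =>
        let b := match s.2 with
          | none => t
          | some b0 => if t > b0 then t else b0
        (s.1 ++ [b], some b)) (acc, best)).1 = acc ++ pmRec best l := by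
    intro l
    induction l with
    | nil => intro acc best; simp [pmRec]
    | cons t ts ih =>
        intro acc best
        simp only [List.foldl_cons, pmRec]
        rw [ih]
        simp
  simpa using h mins [] none

theorem length_pmRec (best : Option Int) (l : List Int) : (pmRec best l).length = l.length := by
  induction l generalizing best with
  | nil => simp [pmRec]
  | cons t ts ih => simp [pmRec, ih]

-- every element of pmRec (some b) l is ≥ b
theorem le_of_mem_pmRec (b : Int) (l : List Int) : ∀ x ∈ pmRec (some b) l, b ≤ x := by
  induction l generalizing b with
  | nil => simp [pmRec]
  | cons t ts ih =>
      intro x hx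
      simp only [pmRec, List.mem_cons] at hx
      rcases hx with rfl | hx
      · split <;> omega
      · by_cases h : t > b
        · have := ih (if t > b then t else b) x hx; simp [h] at this ⊢; omega
        · have := ih (if t > b then t else b) x hx; simp [h] at this ⊢; omega

theorem pairwise_pmRec (best : Option Int) (l : List Int) :
    (pmRec best l).Pairwise (· ≤ ·) := by
  induction l generalizing best with
  | nil => simp [pmRec]
  | cons t ts ih =>
      simp only [pmRec]
      exact List.pairwise_cons.mpr ⟨le_of_mem_pmRec _ ts, ih _⟩

-- first index exceeding res agrees between a list and its running prefix maximum
theorem findIdx_pmRec (res : Int) (l : List Int) (b : Int) (hb : b ≤ res) :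
    (pmRec (some b) l).findIdx (fun t => res < t) = l.findIdx (fun t => res < t) := by
  induction l generalizing b with
  | nil => simp [pmRec]
  | cons t ts ih =>
      simp only [pmRec, List.findIdx_cons]
      by_cases h : t > b
      · simp only [h, if_pos]
        by_cases hr : res < t
        · simp [hr]
        · have : ¬ res < (if t > b then t else b) := by simp [h]; omega
          simp [hr, ih t (by omega)]
      · simp only [h]
        have hbr : ¬ res < b := by omega
        by_cases hr : res < t
        · omega
        · simp [hr, hbr, ih b hb]

theorem findIdx_pmRec_none (res : Int) (l : List Int) :
    (pmRec none l).findIdx (fun t => res < t) = l.findIdx (fun t => res < t) := by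
  cases l with
  | nil => simp [pmRec]
  | cons t ts =>
      simp only [pmRec, List.findIdx_cons]
      by_cases hr : res < t
      · simp [hr]
      · simp [hr, findIdx_pmRec res ts t (by omega)]

-- on a nondecreasing list, bisectRight computes the first index whose element exceeds x
theorem bisectRight_eq_findIdx (l : List Int) (x : Int) (hs : l.Pairwise (· ≤ ·)) :
    PySem.List.bisectRight l x = l.findIdx (fun t => x < t) := by
  obtain ⟨hle, hlt, hgt⟩ := PySem.List.bisectRight_spec l x hs
  set b := PySem.List.bisectRight l x with hb
  set c := l.findIdx (fun t => x < t) with hc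
  have hcle : c ≤ l.length := List.findIdx_le_length
  rcases lt_trichotomy b c with h | h | h
  · -- b < c: element at b is ≤ x by findIdx, but > x by spec
    have hblen : b < l.length := lt_of_lt_of_le h hcle
    have h1 : x < l[b] := hgt b hblen (le_refl b)
    have h2 : ¬ (x < l[b]) := by
      have := List.not_of_lt_findIdx (p := fun t => x < t) (xs := l) (by omega : b < c)
      simpa using this
    omega
  · exact h
  · -- c < b: element at c satisfies the predicate, but spec says l[c] ≤ x
    have hclen : c < l.length := lt_of_lt_of_le h hle
    have h1 : x < l[c] := by
      have := List.findIdx_getElem (p := fun t => x < t) (xs := l) (w := hclen)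
      simpa using this
    have h2 : l[c] ≤ x := hlt c hclen h
    omega

-- A's inner loop computes: first index (from i) whose threshold exceeds res, else length
theorem clusteringInner_eq (mins : List Int) (res : Int) (node : String)
    (i : Nat) (hi : i < mins.length) (d : PySem.Dict String Int) :
    clusteringInner mins res node i d
      = d.insert node ((i : Int) + ((mins.drop i).findIdx (fun t => res < t) : Int)) := by
  have hdrop : mins.drop i = mins[i] :: mins.drop (i + 1) := List.drop_eq_getElem_cons hi
  rw [clusteringInner]
  simp only [hi, dif_pos]
  by_cases h1 : res < mins[i]
  · rw [if_pos h1, hdrop, List.findIdx_cons]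
    simp [h1]
  · rw [if_neg h1]
    by_cases h2 : i = mins.length - 1
    · rw [if_pos h2, hdrop, List.findIdx_cons]
      have : mins.drop (i + 1) = [] := List.drop_eq_nil_of_le (by omega)
      simp [h1, this]
    · rw [if_neg h2]
      rw [clusteringInner_eq mins res node (i + 1) (by omega) d]
      rw [hdrop, List.findIdx_cons]
      simp only [h1, decide_false, cond_false]
      congr 1
      push_cast
      ring
termination_by mins.length - i

-- the two per-value results coincide (mins nonempty)
theorem step_eq (mins : List Int) (res : Int) (node : String) (d : PySem.Dict String Int)
    (hne : mins ≠ []) :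
    clusteringInner mins res node 0 d
      = d.insert node ((PySem.List.bisectRight (prefixMaxB mins).1 res : Nat) : Int) := by
  have hlen : 0 < mins.length := List.length_pos_of_ne_nil hne
  rw [clusteringInner_eq mins res node 0 hlen d]
  rw [prefixMaxB_fst]
  rw [bisectRight_eq_findIdx _ _ (pairwise_pmRec none mins)]
  rw [findIdx_pmRec_none]
  simp

-- ===== VERDICT (by name: the statement is the Claim_ definition above) =====
theorem clustering_spec : Claim_equal_clustering := by
  intro mins res_array nodes _hdom _hpre
  simp only [Spec_clustering, clustering, clustering_alt]
  by_cases hm : mins = []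
  · subst hm
    have hpm : (prefixMaxB ([] : List Int)).1 = [] := by rw [prefixMaxB_fst]; rfl
    rw [hpm]
    simp only [List.isEmpty_nil, if_pos]
    congr 1
    have hstep : ∀ (p : Int × Int) (d : PySem.Dict String Int),
        clusteringInner [] p.2 ((PySem.List.pyGet? nodes p.1).getD "") 0 d = d := by
      intro p d
      rw [clusteringInner]
      simp
    induction (PySem.List.enumerate res_array) with
    | nil => simp
    | cons p ps ih =>
        simp only [List.foldl_cons]
        rw [hstep]
        exact ih
  · have hpmlen : ((prefixMaxB mins).1).length = mins.length := by
      rw [prefixMaxB_fst]; exact length_pmRec none mins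
    have hpm : ¬ ((prefixMaxB mins).1).isEmpty := by
      simp only [List.isEmpty_iff]
      intro h
      apply hm
      have := hpmlen
      rw [h] at this
      exact List.eq_nil_of_length_eq_zero this.symm
    rw [if_neg hpm]
    congr 1
    have hfun : (fun (clusters : PySem.Dict String Int) (p : Int × Int) =>
          clusteringInner mins p.2 ((PySem.List.pyGet? nodes p.1).getD "") 0 clusters)
        = (fun (clusters : PySem.Dict String Int) (p : Int × Int) =>
          clusters.insert ((PySem.List.pyGet? nodes p.1).getD "")
            ((PySem.List.bisectRight (prefixMaxB mins).1 p.2 : Nat) : Int)) := by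
      funext d p
      exact step_eq mins p.2 ((PySem.List.pyGet? nodes p.1).getD "") d hm
    rw [hfun]
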